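-- pv_equiv track=rewrite | github.com/rahisenpai/CSE643-AI | asgn1/code_2022216.py | get_ids_path
-- ===== SOURCE A (Python) =====
-- def depth_limited_search(adj_matrix, curr_node, goal_node, depth, reached):
--   #returns true if goal is found at depth, else false
--   #base cases
--   if curr_node == goal_node:
--     return True #goal is found
--   if depth == 0:
--     return False #exhausted depth
--
--   #find neighbors from adjacency matrix
--   neighbors = []
--   for i in range(len(adj_matrix)):
--     if adj_matrix[curr_node][i] > 0: #condition for neighbors
--       neighbors.append(i)
--
--   #proceed with dfs
--   for next_node in neighbors:
--     #if next node is not already visited, avoid cycles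
--     if next_node not in reached:
--       reached[next_node] = curr_node #add in reached
--       #we are using process stack as the frontier
--       if depth_limited_search(adj_matrix, next_node, goal_node, depth-1, reached):
--         return True
--   return False
--
-- def get_ids_path(adj_matrix, start_node, goal_node):
--   #first we will perform ids
--   flag = False #setting flag to check if we ever found goal node
--   #checking at all depths
--   for depth in range(len(adj_matrix)):
--     #using a dictionary to store visited nodes (to avoid cycles) as key and parent nodes as value
--     #this dictionary will be used to build the path from goal to start
--     reached = {start_node:None}
--     if depth_limited_search(adj_matrix, start_node, goal_node, depth, reached):
--       flag = True #set flag true as we found goal node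
--       break #we found the goal and don't need to increase depth furhter
--
--   if not flag: #goal node was never found at any depth
--     return None
--
--   #finding the path from goal to start
--   path = [goal_node]
--   node = goal_node
--   while reached[node]: #loop will stop when it reaches start_node as its values is None
--     path.append(reached[node])
--     node = reached[node]
--   path.reverse() #reverse the path from start to goal
--   return path
-- ===== SOURCE B (Python) =====
-- def get_ids_path(adj_matrix, start_node, goal_node):
--   #iterative deepening with an explicit stack of (node, remaining_depth, next_index) frames
--   n = len(adj_matrix)
--   found = False
--   for depth in range(n):
--     reached = {start_node: None}
--     if start_node == goal_node:
--       found = True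
--       break
--     if depth == 0:
--       continue  #cannot descend at depth 0
--     stack = [(start_node, depth, 0)]
--     while stack:
--       c, d, i = stack[-1]
--       if i >= n:
--         stack.pop()  #this frame's neighbors are exhausted
--         continue
--       stack[-1] = (c, d, i + 1)
--       if adj_matrix[c][i] > 0 and i not in reached:
--         reached[i] = c  #mark at the moment of descent
--         if i == goal_node:
--           found = True
--           break
--         if d > 1:
--           stack.append((i, d - 1, 0))
--     if found:
--       break
--
--   if not found:
--     return None
--   #reconstruct the path from the parent links, as in the original
--   path = [goal_node]
--   node = goal_node
--   while reached[node]: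
--     path.append(reached[node])
--     node = reached[node]
--   path.reverse()
--   return path
-- ===== Notes on version B (the rewrite author's own statement) =====
-- stated objective: alternative
-- what changed: The recursive depth_limited_search is replaced by an explicit stack of (node, remaining_depth, next_neighbor_index) frames that simulates its call frames, with the per-node neighbor-list precomputation fused into the index scan; the outer deepening loop and the parent-dict path reconstruction are kept.
-- outside the precondition, e.g. on get_ids_path([[0, 0], [0]], 0, 1): A returns None, B returns None
import Mathlib
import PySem

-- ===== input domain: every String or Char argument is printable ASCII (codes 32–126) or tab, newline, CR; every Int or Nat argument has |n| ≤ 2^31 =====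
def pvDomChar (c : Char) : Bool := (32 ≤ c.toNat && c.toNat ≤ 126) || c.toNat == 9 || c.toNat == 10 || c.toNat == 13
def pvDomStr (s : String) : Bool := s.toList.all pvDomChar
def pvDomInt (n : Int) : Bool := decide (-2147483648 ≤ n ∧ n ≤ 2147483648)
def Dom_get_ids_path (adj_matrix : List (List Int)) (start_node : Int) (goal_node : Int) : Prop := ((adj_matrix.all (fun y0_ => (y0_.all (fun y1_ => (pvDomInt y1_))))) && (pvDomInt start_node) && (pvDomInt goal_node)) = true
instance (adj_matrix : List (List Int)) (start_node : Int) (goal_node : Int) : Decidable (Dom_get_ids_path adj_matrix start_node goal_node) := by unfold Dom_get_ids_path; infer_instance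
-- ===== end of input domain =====

-- B replaces A's recursive depth-limited search by an explicit stack of (node, depth, next-index)
-- frames with the neighbor-list precomputation fused into the index scan (objective: alternative).


-- ===== PORT A =====
-- adj_matrix[c][i] (the pyGetD/getD defaults are totality guards; Pre_ keeps indexing in range)
def pvRowGet (adj_matrix : List (List Int)) (c : Int) (i : Int) : Int :=
  PySem.List.pyGetD ((PySem.List.pyGet? adj_matrix c).getD []) i 0

-- 'neighbors = []; for i in range(len(adj_matrix)): if adj_matrix[curr_node][i] > 0: neighbors.append(i)'
def pvNeighbors (adj_matrix : List (List Int)) (c : Int) : List Int :=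
  (PySem.List.pyRange 0 (PySem.List.len adj_matrix) 1).foldl
    (fun acc i => if 0 < pvRowGet adj_matrix c i then acc ++ [i] else acc) []

mutual
  -- depth_limited_search (reached threaded as explicit state)
  def pvDls (adj_matrix : List (List Int)) (goal : Int) (c : Int) (d : Nat)
      (r : PySem.Dict Int (Option Int)) : Bool × PySem.Dict Int (Option Int) :=
    if c = goal then (true, r)
    else if d = 0 then (false, r)
    else pvVisit adj_matrix goal c (d - 1) (pvNeighbors adj_matrix c) r
  termination_by (d, 0)
  -- 'for next_node in neighbors: if next_node not in reached: …'  (dm is depth - 1, the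
  -- depth handed to each recursive depth_limited_search call)
  def pvVisit (adj_matrix : List (List Int)) (goal : Int) (c : Int) (dm : Nat)
      (ns : List Int) (r : PySem.Dict Int (Option Int)) : Bool × PySem.Dict Int (Option Int) :=
    match ns with
    | [] => (false, r)
    | nx :: rest =>
      if r.contains nx then pvVisit adj_matrix goal c dm rest r
      else
        match pvDls adj_matrix goal nx dm (r.insert nx (some c)) with
        | (true, r2) => (true, r2)
        | (false, r2) => pvVisit adj_matrix goal c dm rest r2
  termination_by (dm, ns.length + 1)
end

-- 'for depth in range(len(adj_matrix)): reached = {start_node: None}; if depth_limited_search(…): break'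
def pvOuterA (adj_matrix : List (List Int)) (start_node goal_node : Int) :
    List Nat → Option (PySem.Dict Int (Option Int))
  | [] => none
  | d :: rest =>
    match pvDls adj_matrix goal_node start_node d
        ((PySem.Dict.empty : PySem.Dict Int (Option Int)).insert start_node none) with
    | (true, r) => some r
    | (false, _) => pvOuterA adj_matrix start_node goal_node rest

-- 'while reached[node]: path.append(reached[node]); node = reached[node]'  (truthiness: None and
-- parent 0 both stop the loop).  The fuel r.size + 1 is a totality guard: the parent chain visits
-- pairwise distinct keys of r, so it never runs out on a dict produced by the search.
def pvBuildA (r : PySem.Dict Int (Option Int)) : Nat → Int → List Int → List Int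
  | 0, _, path => path
  | fuel + 1, node, path =>
    match (r.get? node).getD none with   -- missing key guarded by 'none' (KeyError unreachable)
    | none => path
    | some p => if p = 0 then path else pvBuildA r fuel p (path ++ [p])

def get_ids_path (adj_matrix : List (List Int)) (start_node : Int) (goal_node : Int) :
    Option (List Int) :=
  match pvOuterA adj_matrix start_node goal_node (List.range adj_matrix.length) with
  | none => none
  | some r => some ((pvBuildA r (r.size + 1) goal_node [goal_node]).reverse)

-- ===== PORT B =====
-- adj_matrix[c][i] on B's side (same totality guards)
def pvAdjAt (adj_matrix : List (List Int)) (c : Int) (i : Int) : Int :=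
  PySem.List.pyGetD ((PySem.List.pyGet? adj_matrix c).getD []) i 0

-- potential of one stack frame, used only as the termination measure of pvMachine
def pvWeight (n : Nat) (f : Int × Nat × Nat) : Nat := (n - f.2.2) * (n + 2) ^ f.2.1 + 1

theorem pvWeight_pos (n : Nat) (f : Int × Nat × Nat) : 1 ≤ pvWeight n f := by
  simp [pvWeight]

theorem pvWeight_inc {n i : Nat} (c : Int) (d : Nat) (h : i < n) :
    pvWeight n (c, d, i + 1) < pvWeight n (c, d, i) := by
  have hp : 0 < (n + 2) ^ d := pow_pos (by omega) d
  simp only [pvWeight]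
  have : (n - (i + 1)) < (n - i) := by omega
  have := (Nat.mul_lt_mul_right hp).mpr this
  omega

theorem pvWeight_push {n i d : Nat} (c c' : Int) (h : i < n) (hd : 1 < d) :
    pvWeight n (c', d - 1, 0) + pvWeight n (c, d, i + 1) < pvWeight n (c, d, i) := by
  have hp : 0 < (n + 2) ^ (d - 1) := pow_pos (by omega) (d - 1)
  have hsucc : d - 1 + 1 = d := by omega
  have hKd : (n + 2) ^ d = (n + 2) ^ (d - 1) * (n + 2) := by
    conv_lhs => rw [← hsucc, pow_succ]
  simp only [pvWeight]
  have hsplit : (n - i) * (n + 2) ^ d = (n - (i + 1)) * (n + 2) ^ d + (n + 2) ^ d := by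
    have : n - i = (n - (i + 1)) + 1 := by omega
    rw [this, Nat.add_mul, one_mul]
  rw [hsplit, hKd]
  have : n * ((n + 2) ^ (d - 1)) + 2 ≤ (n + 2) ^ (d - 1) * (n + 2) := by nlinarith
  simp only [Nat.sub_zero]
  omega

-- the while-stack loop of B: frames (curr_node, remaining_depth, next_neighbor_index)
def pvMachine (adj_matrix : List (List Int)) (goal : Int)
    (stack : List (Int × Nat × Nat)) (r : PySem.Dict Int (Option Int)) :
    Bool × PySem.Dict Int (Option Int) :=
  match stack with
  | [] => (false, r)
  | (c, d, i) :: rest =>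
    if h : i < adj_matrix.length then
      if 0 < pvAdjAt adj_matrix c (i : Int) ∧ r.contains (i : Int) = false then
        let r2 := r.insert (i : Int) (some c)
        if (i : Int) = goal then (true, r2)
        else if 1 < d then
          pvMachine adj_matrix goal (((i : Int), d - 1, 0) :: (c, d, i + 1) :: rest) r2
        else pvMachine adj_matrix goal ((c, d, i + 1) :: rest) r2
      else pvMachine adj_matrix goal ((c, d, i + 1) :: rest) r
    else pvMachine adj_matrix goal rest r
termination_by (stack.map (pvWeight adj_matrix.length)).sum
decreasing_by
  · have := pvWeight_push (n := adj_matrix.length) (i := i) (d := d) c (i : Int) h (by omega)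
    simp only [List.map_cons, List.sum_cons]; omega
  · have := pvWeight_inc (n := adj_matrix.length) (i := i) c d h
    simp only [List.map_cons, List.sum_cons]; omega
  · have := pvWeight_inc (n := adj_matrix.length) (i := i) c d h
    simp only [List.map_cons, List.sum_cons]; omega
  · have := pvWeight_pos adj_matrix.length (c, d, i)
    simp only [List.map_cons, List.sum_cons]; omega

-- B's outer iterative-deepening loop
def pvOuterB (adj_matrix : List (List Int)) (start_node goal_node : Int) :
    List Nat → Option (PySem.Dict Int (Option Int))
  | [] => none
  | d :: rest =>
    let r0 := (PySem.Dict.empty : PySem.Dict Int (Option Int)).insert start_node none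
    if start_node = goal_node then some r0
    else if d = 0 then pvOuterB adj_matrix start_node goal_node rest
    else
      match pvMachine adj_matrix goal_node [(start_node, d, 0)] r0 with
      | (true, r) => some r
      | (false, _) => pvOuterB adj_matrix start_node goal_node rest

-- B's path reconstruction (same parent-link walk as the original; same fuel totality guard)
def pvBuildB (r : PySem.Dict Int (Option Int)) : Nat → Int → List Int → List Int
  | 0, _, path => path
  | fuel + 1, node, path =>
    match (r.get? node).getD none with
    | none => path
    | some p => if p = 0 then path else pvBuildB r fuel p (path ++ [p])

def get_ids_path_alt (adj_matrix : List (List Int)) (start_node : Int) (goal_node : Int) :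
    Option (List Int) :=
  match pvOuterB adj_matrix start_node goal_node (List.range adj_matrix.length) with
  | none => none
  | some r => some ((pvBuildB r (r.size + 1) goal_node [goal_node]).reverse)

-- ===== PRECONDITION & SPEC =====
-- Pre_ excludes the inputs where Python A's indexing adj_matrix[curr][i] can raise IndexError:
-- when len(adj_matrix) ≥ 2 and start ≠ goal (otherwise A never indexes), it requires every row
-- to have at least len(adj_matrix) entries and the start index to lie in [-n, n).  This
-- over-approximates slightly: A still returns None on some ragged matrices whose short rows are
-- never actually visited (see the cite in claim.json); B agrees with A there too.
def Pre_get_ids_path (adj_matrix : List (List Int)) (start_node : Int) (goal_node : Int) : Prop :=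
  2 ≤ adj_matrix.length ∧ start_node ≠ goal_node →
    (∀ row ∈ adj_matrix, adj_matrix.length ≤ row.length) ∧
    (-(adj_matrix.length : Int) ≤ start_node ∧ start_node < (adj_matrix.length : Int))
instance (adj_matrix : List (List Int)) (start_node : Int) (goal_node : Int) : Decidable (Pre_get_ids_path adj_matrix start_node goal_node) := by unfold Pre_get_ids_path; infer_instance

def pvWitness_get_ids_path : List (List Int) × Int × Int := ([[0, 1], [0, 0]], 0, 1)

def Spec_get_ids_path (adj_matrix : List (List Int)) (start_node : Int) (goal_node : Int) (out : Option (List Int)) : Prop := out = get_ids_path_alt adj_matrix start_node goal_node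
instance (adj_matrix : List (List Int)) (start_node : Int) (goal_node : Int) (out : Option (List Int)) : Decidable (Spec_get_ids_path adj_matrix start_node goal_node out) := by unfold Spec_get_ids_path; infer_instance

-- ===== CLAIM (what is proved, stated in full; the proofs are below) =====
def Claim_equal_get_ids_path : Prop := ∀ (adj_matrix : List (List Int)) (start_node : Int) (goal_node : Int), Dom_get_ids_path adj_matrix start_node goal_node → Pre_get_ids_path adj_matrix start_node goal_node → Spec_get_ids_path adj_matrix start_node goal_node (get_ids_path adj_matrix start_node goal_node)

-- ===== LEMMAS AND PROOFS =====

theorem pvBuild_eq (r : PySem.Dict Int (Option Int)) :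
    ∀ fuel node path, pvBuildA r fuel node path = pvBuildB r fuel node path := by
  intro fuel
  induction fuel with
  | zero => intro node path; rfl
  | succ f ih =>
    intro node path
    simp only [pvBuildA, pvBuildB]
    cases (r.get? node).getD none with
    | none => rfl
    | some p =>
      by_cases hp : p = 0 <;> simp [hp, ih]

-- the suffix of A's neighbor list starting at index i
def pvNbrFrom (adj_matrix : List (List Int)) (c : Int) (i : Nat) : List Int :=
  if _h : i < adj_matrix.length then
    (if 0 < pvRowGet adj_matrix c (i : Int) then [(i : Int)] else []) ++
      pvNbrFrom adj_matrix c (i + 1)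
  else []
termination_by adj_matrix.length - i

theorem pvNbrFrom_filter (adj_matrix : List (List Int)) (c : Int) :
    ∀ i : Nat,
      pvNbrFrom adj_matrix c i =
        (PySem.List.pyRange (i : Int) (adj_matrix.length : Int) 1).filter
          (fun j => decide (0 < pvRowGet adj_matrix c j)) := by
  intro i
  induction i using pvNbrFrom.induct (adj_matrix := adj_matrix) with
  | case1 i h ih =>
    rw [pvNbrFrom]
    have hlt : (i : Int) < (adj_matrix.length : Int) := by exact_mod_cast h
    rw [PySem.List.pyRange_one_cons hlt, List.filter_cons]
    have hc : ((i : Nat) + 1 : Int) = (((i + 1 : Nat)) : Int) := by push_cast; ring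
    rw [hc, ← ih]
    by_cases hp : 0 < pvRowGet adj_matrix c (i : Int) <;> simp [h, hp]
  | case2 i h =>
    rw [pvNbrFrom]
    have hle : (adj_matrix.length : Int) ≤ (i : Int) := by exact_mod_cast Nat.le_of_not_lt h
    simp [h, PySem.List.pyRange_one_eq_nil hle]

theorem pvNeighbors_eq (adj_matrix : List (List Int)) (c : Int) :
    pvNeighbors adj_matrix c = pvNbrFrom adj_matrix c 0 := by
  unfold pvNeighbors
  rw [PySem.List.foldl_append_ite_eq_filter, pvNbrFrom_filter, PySem.List.len_eq]
  simp

theorem pvAdjAt_eq_pvRowGet (adj_matrix : List (List Int)) (c i : Int) :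
    pvAdjAt adj_matrix c i = pvRowGet adj_matrix c i := rfl

-- the stack machine run on (c, d, i) :: rest behaves like A's scan of c's neighbors from index i,
-- then continues with rest
theorem pvMachine_sim (adj_matrix : List (List Int)) (goal : Int) :
    ∀ (N : Nat) (c : Int) (d i : Nat) (rest : List (Int × Nat × Nat))
      (r : PySem.Dict Int (Option Int)),
      (((c, d, i) :: rest).map (pvWeight adj_matrix.length)).sum ≤ N →
      pvMachine adj_matrix goal ((c, d, i) :: rest) r =
        match pvVisit adj_matrix goal c (d - 1) (pvNbrFrom adj_matrix c i) r with
        | (true, r') => (true, r')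
        | (false, r') => pvMachine adj_matrix goal rest r' := by
  intro N
  induction N using Nat.strong_induction_on with
  | _ N ih =>
  intro c d i rest r hN
  by_cases h : i < adj_matrix.length
  · -- the frame still has indices to scan
    have hinc : (((c, d, i + 1) :: rest).map (pvWeight adj_matrix.length)).sum <
        (((c, d, i) :: rest).map (pvWeight adj_matrix.length)).sum := by
      have := pvWeight_inc (n := adj_matrix.length) (i := i) c d h
      simp only [List.map_cons, List.sum_cons]; omega
    rw [pvMachine, pvNbrFrom]
    simp only [dif_pos h]
    by_cases hp : 0 < pvRowGet adj_matrix c (i : Int)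
    · by_cases hcont : r.contains (i : Int) = false
      · -- descend into neighbor i
        rw [if_pos ⟨by rw [pvAdjAt_eq_pvRowGet]; exact hp, hcont⟩]
        simp only [if_pos hp, List.singleton_append, pvVisit, hcont, Bool.false_eq_true,
          if_false]
        by_cases hg : (i : Int) = goal
        · rw [if_pos hg]
          rw [pvDls, if_pos hg]
        · rw [if_neg hg]
          by_cases hd : 1 < d
          · -- push a child frame
            have hdm : ¬ (d - 1 = 0) := by omega
            rw [if_pos hd]
            rw [pvDls, if_neg hg, if_neg hdm]
            have hpush : ((((i : Int), d - 1, 0) :: (c, d, i + 1) :: rest).map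
                (pvWeight adj_matrix.length)).sum <
                (((c, d, i) :: rest).map (pvWeight adj_matrix.length)).sum := by
              have := pvWeight_push (n := adj_matrix.length) (i := i) (d := d) c (i : Int) h hd
              simp only [List.map_cons, List.sum_cons]; omega
            rw [ih _ (Nat.lt_of_lt_of_le hpush hN) _ _ _ _ _ (Nat.le_refl _)]
            rw [pvNeighbors_eq]
            cases hv : pvVisit adj_matrix goal (i : Int) (d - 1 - 1)
                (pvNbrFrom adj_matrix (i : Int) 0) (r.insert (i : Int) (some c)) with
            | mk b r3 =>
              cases b
              · simp only
                rw [ih _ (Nat.lt_of_lt_of_le hinc hN) _ _ _ _ _ (Nat.le_refl _)]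
              · simp only
          · -- child depth exhausted: A's recursive call returns False at once
            have hdm : d - 1 = 0 := by omega
            rw [if_neg hd]
            rw [pvDls, if_neg hg, if_pos hdm]
            simp only
            rw [ih _ (Nat.lt_of_lt_of_le hinc hN) _ _ _ _ _ (Nat.le_refl _)]
      · -- neighbor already reached: skip it
        rw [if_neg (by simp [pvAdjAt_eq_pvRowGet, hp, hcont])]
        simp only [if_pos hp, List.singleton_append, pvVisit, hcont]
        rw [if_pos (by revert hcont; cases r.contains (i : Int) <;> simp)]
        exact ih _ (Nat.lt_of_lt_of_le hinc hN) _ _ _ _ _ (Nat.le_refl _)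
    · -- not a neighbor: skip the index
      rw [if_neg (by simp [pvAdjAt_eq_pvRowGet, hp])]
      simp only [if_neg hp, List.nil_append]
      exact ih _ (Nat.lt_of_lt_of_le hinc hN) _ _ _ _ _ (Nat.le_refl _)
  · -- indices exhausted: pop the frame
    rw [pvMachine, pvNbrFrom]
    simp [h, pvVisit]

theorem pvOuter_eq (adj_matrix : List (List Int)) (start_node goal_node : Int) :
    ∀ ds : List Nat,
      pvOuterA adj_matrix start_node goal_node ds = pvOuterB adj_matrix start_node goal_node ds := by
  intro ds
  induction ds with
  | nil => rfl
  | cons d rest ih =>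
    simp only [pvOuterA, pvOuterB]
    by_cases hg : start_node = goal_node
    · rw [pvDls, if_pos hg, if_pos hg]
    · rw [if_neg hg]
      by_cases hd : d = 0
      · rw [pvDls, if_neg hg, if_pos hd, if_pos hd]
        exact ih
      · rw [if_neg hd, pvDls, if_neg hg, if_neg hd]
        rw [pvMachine_sim adj_matrix goal_node
          ((([(start_node, d, 0)] : List (Int × Nat × Nat)).map
            (pvWeight adj_matrix.length)).sum) start_node d 0 []
          ((PySem.Dict.empty : PySem.Dict Int (Option Int)).insert start_node none)
          (Nat.le_refl _)]
        rw [pvNeighbors_eq]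
        cases pvVisit adj_matrix goal_node start_node (d - 1)
            (pvNbrFrom adj_matrix start_node 0)
            ((PySem.Dict.empty : PySem.Dict Int (Option Int)).insert start_node none) with
        | mk b r' =>
          cases b
          · simp only
            rw [pvMachine]
            exact ih
          · simp only

-- ===== VERDICT (by name: the statement is the Claim_ definition above) =====
theorem get_ids_path_spec : Claim_equal_get_ids_path := by
  intro adj start goal _hdom _hpre
  unfold Spec_get_ids_path get_ids_path get_ids_path_alt
  rw [pvOuter_eq]
  cases pvOuterB adj start goal (List.range adj.length) with
  | none => rfl
  | some r => simp [pvBuild_eq]
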